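-- pv_equiv track=rewrite | github.com/zv35/Hamming-Code | baudot.py | encodeBaudot
-- ===== SOURCE A (Python) =====
-- SIGNS = {
-- 	"FS": "11011",
-- 	"LS": "11111",
-- 	"SP": "00100", # take fron ER
-- }
--
-- LETTERS = {
-- 	"A": "00011",
-- 	"B": "11001",
-- 	"C": "01110",
-- 	"D": "01001",
-- 	"E": "00001",
-- 	"F": "01101",
-- 	"G": "11010",
-- 	"H": "10100",
-- 	"I": "00110",
-- 	"J": "01011",
-- 	"K": "01111",
-- 	"L": "10010",
-- 	"M": "11100",
-- 	"N": "01100",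
-- 	"O": "11000",
-- 	"P": "10110",
-- 	"Q": "10111",
-- 	"R": "01010",
-- 	"S": "00101",
-- 	"T": "10000",
-- 	"U": "00111",
-- 	"V": "11110",
-- 	"W": "10011",
-- 	"X": "11101",
-- 	"Y": "10101",
-- 	"Z": "10001"
-- }
--
-- FIGURES = {
-- 	"0": "10110",
-- 	"1": "10111",
-- 	"2": "10011",
-- 	"3": "00001",
-- 	"4": "01010",
-- 	"5": "10000",
-- 	"6": "10101",
-- 	"7": "00111",
-- 	"8": "00110",
-- 	"9": "11000",
-- 	"-": "00011",
-- 	"?": "11001",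
-- 	":": "01110",
-- 	"(": "01111",
-- 	")": "10010",
-- 	".": "11100",
-- 	",": "01100",
-- 	"'": "00101",
-- 	"=": "11110",
-- 	"/": "11101",
-- 	"+": "10001",
-- 	"!": "01101",
--     	"&": "11010"
-- }
--
-- def encodeBaudot(info):
--
-- 	rst = []
-- 	text = info.upper().split()
--
-- 	LC = 0 	# letter count
-- 	FC = 0 	# figure
--
-- 	for word in text:
-- 		s = []
-- 		for letter in word:
--
-- 			if letter in LETTERS:
-- 				if LC > 0:
-- 					s.append(LETTERS[letter])
-- 					#LC += 1
-- 				else: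
-- 					s.append(SIGNS['LS'])
-- 					s.append(LETTERS[letter])
-- 					LC += 1
-- 					FC = 0
--
-- 			if letter in FIGURES:
-- 				if FC > 0:
-- 					s.append(FIGURES[letter])
-- 				else:
-- 					s.append(SIGNS['FS'])
-- 					s.append(FIGURES[letter])
-- 					FC += 1
-- 					LC = 0
--
-- 		rst.extend(s)
-- 		rst.append(SIGNS['SP'])
--
-- 	return rst[:-1]
-- ===== SOURCE B (Python) =====
-- SIGNS = {
-- 	"FS": "11011",
-- 	"LS": "11111",
-- 	"SP": "00100", # take fron ER
-- }
--
-- LETTERS = {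
-- 	"A": "00011", "B": "11001", "C": "01110", "D": "01001", "E": "00001",
-- 	"F": "01101", "G": "11010", "H": "10100", "I": "00110", "J": "01011",
-- 	"K": "01111", "L": "10010", "M": "11100", "N": "01100", "O": "11000",
-- 	"P": "10110", "Q": "10111", "R": "01010", "S": "00101", "T": "10000",
-- 	"U": "00111", "V": "11110", "W": "10011", "X": "11101", "Y": "10101",
-- 	"Z": "10001"
-- }
--
-- FIGURES = {
-- 	"0": "10110", "1": "10111", "2": "10011", "3": "00001", "4": "01010",
-- 	"5": "10000", "6": "10101", "7": "00111", "8": "00110", "9": "11000",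
-- 	"-": "00011", "?": "11001", ":": "01110", "(": "01111", ")": "10010",
-- 	".": "11100", ",": "01100", "'": "00101", "=": "11110", "/": "11101",
-- 	"+": "10001", "!": "01101", "&": "11010"
-- }
--
-- SHIFT = {'L': SIGNS['LS'], 'F': SIGNS['FS']}
--
-- def encodeBaudot(info):
-- 	# staged pipeline: classify -> mark shift positions by predecessor comparison -> merge
-- 	flat = ' '.join(info.upper().split())
-- 	toks = [(' ', SIGNS['SP']) if c == ' ' else
-- 	        ('L', LETTERS[c]) if c in LETTERS else
-- 	        ('F', FIGURES[c])
-- 	        for c in flat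
-- 	        if c == ' ' or c in LETTERS or c in FIGURES]
-- 	kinds = [k for k, _ in toks if k != ' ']
-- 	need = [a != b for a, b in zip(kinds, [None] + kinds)]
-- 	out, j = [], 0
-- 	for k, code in toks:
-- 		if k != ' ':
-- 			if need[j]:
-- 				out.append(SHIFT[k])
-- 			j += 1
-- 		out.append(code)
-- 	return out
-- ===== Notes on version B (the rewrite author's own statement) =====
-- stated objective: alternative
-- what changed: Replaces A's single-pass state machine (nested word/char loops carrying LC/FC mode counters, per-word buffers and a trailing-SP trim) by a staged pipeline: classify the normalised characters into tagged tokens, compute the shift positions in one go by comparing each non-space kind with its predecessor (zip against the shifted kinds list), then merge tokens with the precomputed shift marks; no mode state is carried while emitting.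
import Mathlib
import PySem

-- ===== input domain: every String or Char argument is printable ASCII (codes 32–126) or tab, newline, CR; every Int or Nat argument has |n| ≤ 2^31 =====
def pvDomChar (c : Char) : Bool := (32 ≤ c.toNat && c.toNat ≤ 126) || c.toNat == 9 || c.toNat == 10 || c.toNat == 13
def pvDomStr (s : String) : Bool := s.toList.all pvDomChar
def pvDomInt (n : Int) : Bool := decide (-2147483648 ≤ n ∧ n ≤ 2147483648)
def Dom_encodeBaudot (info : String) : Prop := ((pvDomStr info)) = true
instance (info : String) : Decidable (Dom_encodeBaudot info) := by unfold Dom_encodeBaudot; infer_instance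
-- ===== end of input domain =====

-- B replaces A's single-pass state machine (nested word/char loops with LC/FC mode counters
-- and trailing-SP trim) by a staged pipeline: classify characters into tagged tokens, mark
-- shift positions by comparing each non-space kind with its predecessor, then merge
-- (objective: alternative decomposition; same asymptotic cost).
-- Python dict keys here are 1-character strings; the ports use Char keys for them.

def SIGNS : PySem.Dict String String :=
  PySem.Dict.mk [("FS", "11011"), ("LS", "11111"), ("SP", "00100")]

def LETTERS : PySem.Dict Char String :=
  PySem.Dict.mk [('A', "00011"), ('B', "11001"), ('C', "01110"), ('D', "01001"),
    ('E', "00001"), ('F', "01101"), ('G', "11010"), ('H', "10100"), ('I', "00110"),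
    ('J', "01011"), ('K', "01111"), ('L', "10010"), ('M', "11100"), ('N', "01100"),
    ('O', "11000"), ('P', "10110"), ('Q', "10111"), ('R', "01010"), ('S', "00101"),
    ('T', "10000"), ('U', "00111"), ('V', "11110"), ('W', "10011"), ('X', "11101"),
    ('Y', "10101"), ('Z', "10001")]

def FIGURES : PySem.Dict Char String :=
  PySem.Dict.mk [('0', "10110"), ('1', "10111"), ('2', "10011"), ('3', "00001"),
    ('4', "01010"), ('5', "10000"), ('6', "10101"), ('7', "00111"), ('8', "00110"),
    ('9', "11000"), ('-', "00011"), ('?', "11001"), (':', "01110"), ('(', "01111"),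
    (')', "10010"), ('.', "11100"), (',', "01100"), ('\'', "00101"), ('=', "11110"),
    ('/', "11101"), ('+', "10001"), ('!', "01101"), ('&', "11010")]

-- ===== PORT A =====
-- body of A's inner loop: the LETTERS 'if' followed by the FIGURES 'if', state (s, LC, FC)
def stepLetterA (t : List String × Int × Int) (letter : Char) : List String × Int × Int :=
  let t1 : List String × Int × Int :=
    match PySem.Dict.get? LETTERS letter with
    | some code =>
        if t.2.1 > 0 then (t.1 ++ [code], t.2.1, t.2.2)
        else (t.1 ++ [PySem.Dict.getD SIGNS "LS" "", code], t.2.1 + 1, (0 : Int))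
    | none => t
  match PySem.Dict.get? FIGURES letter with
  | some code =>
      if t1.2.2 > 0 then (t1.1 ++ [code], t1.2.1, t1.2.2)
      else (t1.1 ++ [PySem.Dict.getD SIGNS "FS" "", code], (0 : Int), t1.2.2 + 1)
  | none => t1

-- body of A's outer loop: run the inner loop on the word, extend rst, append SP
def stepWordA (st : List String × Int × Int) (word : String) : List String × Int × Int :=
  let inner := word.toList.foldl stepLetterA ([], st.2.1, st.2.2)
  (st.1 ++ inner.1 ++ [PySem.Dict.getD SIGNS "SP" ""], inner.2.1, inner.2.2)

def encodeBaudot (info : String) : List String :=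
  let text := PySem.Str.split₀ (PySem.Str.upper info)
  let final := text.foldl stepWordA ([], 0, 0)
  PySem.List.slice final.1 none (some (-1))

-- ===== PORT B =====
def SHIFT : PySem.Dict Char String :=
  PySem.Dict.mk [('L', PySem.Dict.getD SIGNS "LS" ""), ('F', PySem.Dict.getD SIGNS "FS" "")]

-- the token comprehension's body: filter + conditional expression
-- (the LETTERS[c]/FIGURES[c] lookups are guarded by the membership test, so getD is exact)
def classifyB (c : Char) : Option (Char × String) :=
  if c = ' ' ∨ (PySem.Dict.get? LETTERS c).isSome ∨ (PySem.Dict.get? FIGURES c).isSome then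
    some (if c = ' ' then (' ', PySem.Dict.getD SIGNS "SP" "")
          else if (PySem.Dict.get? LETTERS c).isSome then ('L', PySem.Dict.getD LETTERS c "")
          else ('F', PySem.Dict.getD FIGURES c ""))
  else none

-- body of B's merge loop, state (out, j); need[j] is always in range (j counts non-space toks)
def mergeStepB (need : List Bool) (st : List String × Nat) (t : Char × String) : List String × Nat :=
  if t.1 ≠ ' ' then
    ((if need.getD st.2 false then st.1 ++ [PySem.Dict.getD SHIFT t.1 ""] else st.1) ++ [t.2],
      st.2 + 1)
  else (st.1 ++ [t.2], st.2)

def encodeBaudot_alt (info : String) : List String :=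
  let flat := PySem.Str.join " " (PySem.Str.split₀ (PySem.Str.upper info))
  let toks := flat.toList.filterMap classifyB
  let kinds := toks.filterMap (fun t => if t.1 ≠ ' ' then some t.1 else none)
  let need := (kinds.zip ((none : Option Char) :: kinds.map some)).map (fun p => some p.1 != p.2)
  (toks.foldl (mergeStepB need) ([], 0)).1

-- ===== PRECONDITION & SPEC =====
def Spec_encodeBaudot (info : String) (out : List String) : Prop := out = encodeBaudot_alt info
instance (info : String) (out : List String) : Decidable (Spec_encodeBaudot info out) := by unfold Spec_encodeBaudot; infer_instance

-- ===== CLAIM (what is proved, stated in full; the proofs are below) =====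
def Claim_equal_encodeBaudot : Prop := ∀ (info : String), Dom_encodeBaudot info → Spec_encodeBaudot info (encodeBaudot info)

-- ===== LEMMAS AND PROOFS =====

-- reference single-pass state machine, the midpoint of the proof: state (out, mode)
def stepB (st : List String × Option Char) (ch : Char) : List String × Option Char :=
  if ch = ' ' then (st.1 ++ [PySem.Dict.getD SIGNS "SP" ""], st.2)
  else
    match PySem.Dict.get? LETTERS ch with
    | some code =>
        if st.2 ≠ some 'L' then (st.1 ++ [PySem.Dict.getD SIGNS "LS" "", code], some 'L')
        else (st.1 ++ [code], st.2)
    | none =>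
      match PySem.Dict.get? FIGURES ch with
      | some code =>
          if st.2 ≠ some 'F' then (st.1 ++ [PySem.Dict.getD SIGNS "FS" "", code], some 'F')
          else (st.1 ++ [code], st.2)
      | none => st

-- correspondence between A's (LC, FC) counters and the reference mode flag
def relMode (LC FC : Int) : Option Char :=
  if LC > 0 then some 'L' else if FC > 0 then some 'F' else none

-- the reachable counter states of A
def InvA (LC FC : Int) : Prop := (LC = 0 ∨ LC = 1) ∧ (FC = 0 ∨ FC = 1) ∧ (LC = 0 ∨ FC = 0)

-- no character is both a letter and a figure
lemma mem_LETTERS_bound (c : Char) (h : c ∈ LETTERS.keys) : 65 ≤ c.toNat ∧ c.toNat ≤ 90 := by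
  simp [LETTERS, PySem.Dict.keys_mk] at h
  rcases h with h|h|h|h|h|h|h|h|h|h|h|h|h|h|h|h|h|h|h|h|h|h|h|h|h|h <;> subst h <;> decide

lemma mem_FIGURES_bound (c : Char) (h : c ∈ FIGURES.keys) : c.toNat ≤ 63 := by
  simp [FIGURES, PySem.Dict.keys_mk] at h
  rcases h with h|h|h|h|h|h|h|h|h|h|h|h|h|h|h|h|h|h|h|h|h|h|h <;> subst h <;> decide

lemma letters_figures_disjoint (c : Char) (v : String)
    (h : PySem.Dict.get? LETTERS c = some v) : PySem.Dict.get? FIGURES c = none := by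
  rw [PySem.Dict.get?_eq_none_iff_not_mem_keys]
  intro hmem
  have hL : c ∈ LETTERS.keys := by
    by_contra hn
    rw [← PySem.Dict.get?_eq_none_iff_not_mem_keys] at hn
    rw [hn] at h; cases h
  have h1 := mem_LETTERS_bound c hL
  have h2 := mem_FIGURES_bound c hmem
  omega

lemma isspace_ne_space {c : Char} (hc : PySem.Chars.isspace c = false) : ¬ c = ' ' := by
  intro h; subst h; exact absurd hc (by decide)

-- one non-space character: the reference step simulates A's inner step through relMode
lemma step_sim (c : Char) (hc : PySem.Chars.isspace c = false)
    (pre s : List String) (LC FC : Int) (h : InvA LC FC) :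
    stepB (pre ++ s, relMode LC FC) c
      = (pre ++ (stepLetterA (s, LC, FC) c).1,
          relMode (stepLetterA (s, LC, FC) c).2.1 (stepLetterA (s, LC, FC) c).2.2)
    ∧ InvA (stepLetterA (s, LC, FC) c).2.1 (stepLetterA (s, LC, FC) c).2.2 := by
  obtain ⟨hL, hF, hLF⟩ := h
  have hcs : ¬ c = ' ' := isspace_ne_space hc
  cases hLc : PySem.Dict.get? LETTERS c with
  | some v =>
    have hFc := letters_figures_disjoint c v hLc
    rcases hL with rfl | rfl
    · rcases hF with rfl | rfl <;>
        simp [stepB, stepLetterA, relMode, hcs, hLc, hFc, InvA]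
    · rcases hLF with h01 | rfl
      · cases h01
      · simp [stepB, stepLetterA, relMode, hcs, hLc, hFc, InvA]
  | none =>
    cases hFc : PySem.Dict.get? FIGURES c with
    | some v =>
      rcases hF with rfl | rfl
      · rcases hL with rfl | rfl <;>
          simp [stepB, stepLetterA, relMode, hcs, hLc, hFc, InvA]
      · rcases hLF with rfl | h01
        · simp [stepB, stepLetterA, relMode, hcs, hLc, hFc, InvA]
        · cases h01
    | none =>
      have hA : stepLetterA (s, LC, FC) c = (s, LC, FC) := by
        simp [stepLetterA, hLc, hFc]
      rw [hA]
      exact ⟨by simp [stepB, hcs, hLc, hFc], hL, hF, hLF⟩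

-- a run of non-space characters
lemma fold_sim (cs : List Char) (hcs : ∀ c ∈ cs, PySem.Chars.isspace c = false)
    (pre s : List String) (LC FC : Int) (h : InvA LC FC) :
    cs.foldl stepB (pre ++ s, relMode LC FC)
      = (pre ++ (cs.foldl stepLetterA (s, LC, FC)).1,
          relMode (cs.foldl stepLetterA (s, LC, FC)).2.1 (cs.foldl stepLetterA (s, LC, FC)).2.2)
    ∧ InvA (cs.foldl stepLetterA (s, LC, FC)).2.1 (cs.foldl stepLetterA (s, LC, FC)).2.2 := by
  induction cs generalizing s LC FC with
  | nil => exact ⟨rfl, h⟩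
  | cons c cs ih =>
    obtain ⟨hstep, hinv⟩ :=
      step_sim c (hcs c (List.mem_cons_self)) pre s LC FC ⟨h.1, h.2.1, h.2.2⟩
    have ih' := ih (fun c' hc' => hcs c' (List.mem_cons_of_mem _ hc'))
      (stepLetterA (s, LC, FC) c).1 (stepLetterA (s, LC, FC) c).2.1
      (stepLetterA (s, LC, FC) c).2.2 hinv
    simpa [hstep] using ih'

-- reference form of A's outer loop: per word the inner chunk, then SP
def encA (q : Int × Int) : List String → List String × (Int × Int)
  | [] => ([], q)
  | w :: rest =>
    let i := w.toList.foldl stepLetterA ([], q.1, q.2)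
    let r := encA (i.2.1, i.2.2) rest
    (i.1 ++ [PySem.Dict.getD SIGNS "SP" ""] ++ r.1, r.2)

lemma foldA_eq_encA (ws : List String) (pre : List String) (LC FC : Int) :
    ws.foldl stepWordA (pre, LC, FC)
      = (pre ++ (encA (LC, FC) ws).1, (encA (LC, FC) ws).2.1, (encA (LC, FC) ws).2.2) := by
  induction ws generalizing pre LC FC with
  | nil => simp [encA]
  | cons w rest ih =>
    simp only [List.foldl_cons, stepWordA, encA]
    rw [ih]
    simp [List.append_assoc]

lemma encA_ne_nil (q : Int × Int) (w : String) (rest : List String) :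
    (encA q (w :: rest)).1 ≠ [] := by
  simp [encA]

-- the reference flat pass over the words joined by single spaces
lemma foldB_main (ws : List String)
    (hws : ∀ w ∈ ws, ∀ c ∈ w.toList, PySem.Chars.isspace c = false) :
    ∀ (LC FC : Int) (pre : List String), InvA LC FC → ws ≠ [] →
    (List.intercalate [' '] (ws.map String.toList)).foldl stepB (pre, relMode LC FC)
      = (pre ++ (encA (LC, FC) ws).1.dropLast,
          relMode (encA (LC, FC) ws).2.1 (encA (LC, FC) ws).2.2) := by
  induction ws with
  | nil => intro _ _ _ _ hne; cases hne rfl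
  | cons w rest ih =>
    intro LC FC pre hInv _
    have hw : ∀ c ∈ w.toList, PySem.Chars.isspace c = false :=
      fun c hc => hws w (List.mem_cons_self) c hc
    obtain ⟨hfold, hinv⟩ := by
      have := fold_sim w.toList hw pre [] LC FC hInv
      rwa [List.append_nil] at this
    cases rest with
    | nil =>
      simp only [List.map_cons, List.map_nil, List.intercalate, List.intersperse,
        List.flatten]
      rw [show w.toList.append [] = w.toList from List.append_nil _, hfold]
      simp [encA]
    | cons w2 r2 =>
      have hstep2 : List.intercalate [' '] (w.toList :: w2.toList :: (r2.map String.toList))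
          = w.toList ++ [' '] ++ List.intercalate [' '] (w2.toList :: (r2.map String.toList)) := by
        simp [List.intercalate, List.intersperse]
      simp only [List.map_cons]
      rw [hstep2, List.append_assoc, List.foldl_append, hfold]
      have hsp : stepB (pre ++ (w.toList.foldl stepLetterA ([], LC, FC)).1,
          relMode (w.toList.foldl stepLetterA ([], LC, FC)).2.1
            (w.toList.foldl stepLetterA ([], LC, FC)).2.2) ' '
          = (pre ++ (w.toList.foldl stepLetterA ([], LC, FC)).1
              ++ [PySem.Dict.getD SIGNS "SP" ""],
             relMode (w.toList.foldl stepLetterA ([], LC, FC)).2.1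
               (w.toList.foldl stepLetterA ([], LC, FC)).2.2) := by
        simp [stepB]
      simp only [List.cons_append, List.nil_append, List.foldl_cons, hsp]
      have ih' := ih (fun w' hw' => hws w' (List.mem_cons_of_mem _ hw'))
        (w.toList.foldl stepLetterA ([], LC, FC)).2.1
        (w.toList.foldl stepLetterA ([], LC, FC)).2.2
        (pre ++ (w.toList.foldl stepLetterA ([], LC, FC)).1
          ++ [PySem.Dict.getD SIGNS "SP" ""]) hinv (by simp)
      simp only [List.map_cons] at ih'
      rw [ih']
      conv_rhs => rw [encA]
      rw [List.dropLast_append_of_ne_nil (encA_ne_nil _ _ _)]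
      simp [List.append_assoc]

-- words produced by Python's str.split() contain no whitespace
lemma split₀_go_nonspace (s cur : List Char) (acc : List (List Char))
    (hcur : ∀ c ∈ cur, PySem.Chars.isspace c = false)
    (hacc : ∀ w ∈ acc, ∀ c ∈ w, PySem.Chars.isspace c = false) :
    ∀ w ∈ PySem.Chars.split₀.go s cur acc, ∀ c ∈ w, PySem.Chars.isspace c = false := by
  induction s generalizing cur acc with
  | nil =>
    intro w hw
    unfold PySem.Chars.split₀.go at hw
    split at hw
    · exact hacc w (List.mem_reverse.mp hw)
    · rcases List.mem_cons.mp (List.mem_reverse.mp hw) with rfl | hw'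
      · exact fun c hc => hcur c (List.mem_reverse.mp hc)
      · exact hacc w hw'
  | cons c rest ih =>
    intro w hw
    unfold PySem.Chars.split₀.go at hw
    by_cases hsp : PySem.Chars.isspace c = true
    · rw [if_pos hsp] at hw
      split at hw
      · exact ih [] acc (by simp) hacc w hw
      · refine ih [] (cur.reverse :: acc) (by simp) ?_ w hw
        intro w' hw' c' hc'
        rcases List.mem_cons.mp hw' with rfl | hw''
        · exact hcur c' (List.mem_reverse.mp hc')
        · exact hacc w' hw'' c' hc'
    · rw [if_neg hsp] at hw
      refine ih (c :: cur) acc ?_ hacc w hw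
      intro c' hc'
      rcases List.mem_cons.mp hc' with rfl | hc''
      · exact Bool.eq_false_iff.mpr hsp
      · exact hcur c' hc''

lemma split₀_nonspace (s : String) :
    ∀ w ∈ PySem.Str.split₀ s, ∀ c ∈ w.toList, PySem.Chars.isspace c = false := by
  intro w hw
  have hmem : w.toList ∈ (PySem.Str.split₀ s).map String.toList :=
    List.mem_map_of_mem hw
  rw [PySem.Str.split₀_map_toList] at hmem
  exact split₀_go_nonspace s.toList [] [] (by simp) (by simp) w.toList hmem

-- A equals the reference flat pass
lemma A_eq_fold (info : String) :
    encodeBaudot info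
      = ((PySem.Str.join " " (PySem.Str.split₀ (PySem.Str.upper info))).toList.foldl
          stepB ([], none)).1 := by
  unfold encodeBaudot
  simp only [PySem.Str.toList_join]
  have hjoin : PySem.Chars.join " ".toList
      ((PySem.Str.split₀ (PySem.Str.upper info)).map String.toList)
      = List.intercalate [' ']
          ((PySem.Str.split₀ (PySem.Str.upper info)).map String.toList) := rfl
  rw [hjoin, PySem.List.slice_to_neg_one,
    foldA_eq_encA (PySem.Str.split₀ (PySem.Str.upper info)) [] 0 0]
  cases hws : PySem.Str.split₀ (PySem.Str.upper info) with
  | nil => simp [encA, List.intercalate]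
  | cons w rest =>
    have hns := split₀_nonspace (PySem.Str.upper info)
    rw [hws] at hns
    have hmain := foldB_main (w :: rest) hns 0 0 []
      ⟨Or.inl rfl, Or.inl rfl, Or.inl rfl⟩ (by simp)
    have hrel : relMode 0 0 = (none : Option Char) := by decide
    rw [hrel] at hmain
    rw [hmain]
    simp

-- === the staged pipeline equals the reference flat pass ===

-- the kind of a non-space character (none for space or unclassified)
def kindNS (c : Char) : Option Char :=
  if c = ' ' then none
  else match PySem.Dict.get? LETTERS c with
  | some _ => some 'L'
  | none => match PySem.Dict.get? FIGURES c with
    | some _ => some 'F'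
    | none => none

-- the need list computed from a starting mode and a kinds list
def needFrom (m : Option Char) (ks : List Char) : List Bool :=
  (ks.zip (m :: ks.map some)).map (fun p => some p.1 != p.2)

lemma kinds_eq (cs : List Char) :
    (cs.filterMap classifyB).filterMap (fun t => if t.1 ≠ ' ' then some t.1 else none)
      = cs.filterMap kindNS := by
  rw [List.filterMap_filterMap]
  congr 1
  funext c
  by_cases hc : c = ' '
  · subst hc; decide
  · cases hL : PySem.Dict.get? LETTERS c with
    | some v => simp [classifyB, kindNS, hc, hL]
    | none =>
      cases hF : PySem.Dict.get? FIGURES c with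
      | some v => simp [classifyB, kindNS, hc, hL, hF]
      | none => simp [classifyB, kindNS, hc, hL, hF]

lemma getD_shift (pre tail : List Bool) (j : Nat) :
    (pre ++ tail).getD (pre.length + j) false = tail.getD j false := by
  induction pre with
  | nil => simp
  | cons b pre ih => simpa [Nat.succ_add] using ih

-- the merge loop only looks at the need list from index j onwards
lemma merge_offset (L : List (Char × String)) (pre tail : List Bool) (out : List String) (j : Nat) :
    L.foldl (mergeStepB (pre ++ tail)) (out, pre.length + j)
      = ((L.foldl (mergeStepB tail) (out, j)).1,
          pre.length + (L.foldl (mergeStepB tail) (out, j)).2) := by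
  induction L generalizing out j with
  | nil => rfl
  | cons t L ih =>
    by_cases ht : t.1 = ' '
    · simp only [List.foldl_cons, mergeStepB, ht, ne_eq, not_true_eq_false, if_false]
      exact ih _ _
    · simp only [List.foldl_cons, mergeStepB, ht, ne_eq, not_false_eq_true, if_true,
        getD_shift]
      have := ih ((if tail.getD j false then out ++ [PySem.Dict.getD SHIFT t.1 ""] else out)
        ++ [t.2]) (j + 1)
      simpa [Nat.add_assoc] using this

-- the staged merge over classified tokens equals the reference flat pass
lemma merge_eq_fold (cs : List Char) :
    ∀ (m : Option Char) (out : List String),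
    ((cs.filterMap classifyB).foldl
        (mergeStepB (needFrom m (cs.filterMap kindNS))) (out, 0)).1
      = (cs.foldl stepB (out, m)).1 := by
  induction cs with
  | nil => intro m out; rfl
  | cons c cs ih =>
    intro m out
    by_cases hc : c = ' '
    · subst hc
      have hcl : classifyB ' ' = some (' ', PySem.Dict.getD SIGNS "SP" "") := by decide
      have hk : kindNS ' ' = none := by decide
      simp only [List.filterMap_cons, hcl, hk, List.foldl_cons]
      have hm : mergeStepB (needFrom m (cs.filterMap kindNS)) (out, 0)
          (' ', PySem.Dict.getD SIGNS "SP" "")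
          = (out ++ [PySem.Dict.getD SIGNS "SP" ""], 0) := by
        simp [mergeStepB]
      rw [hm]
      have hs : stepB (out, m) ' ' = (out ++ [PySem.Dict.getD SIGNS "SP" ""], m) := by
        simp [stepB]
      rw [hs]
      exact ih m _
    · cases hL : PySem.Dict.get? LETTERS c with
      | some v =>
        have hcl : classifyB c = some ('L', PySem.Dict.getD LETTERS c "") := by
          simp [classifyB, hc, hL]
        have hgd : PySem.Dict.getD LETTERS c "" = v := by
          simp [PySem.Dict.getD, hL]
        have hk : kindNS c = some 'L' := by simp [kindNS, hc, hL]
        simp only [List.filterMap_cons, hcl, hk, List.foldl_cons]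
        have hneed : needFrom m ('L' :: cs.filterMap kindNS)
            = (some 'L' != m) :: needFrom (some 'L') (cs.filterMap kindNS) := by
          simp [needFrom, List.zip]
        rw [hneed]
        set b0 : Bool := (some 'L' != m) with hb0
        set tail := needFrom (some 'L') (cs.filterMap kindNS) with htail
        have hm : mergeStepB (b0 :: tail) (out, 0) ('L', PySem.Dict.getD LETTERS c "")
            = ((if b0 then out ++ [PySem.Dict.getD SHIFT 'L' ""] else out)
                ++ [v], 1) := by
          simp [mergeStepB, hgd]
        rw [hm]
        have hoff := merge_offset (cs.filterMap classifyB) [b0] tail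
          ((if b0 then out ++ [PySem.Dict.getD SHIFT 'L' ""] else out) ++ [v]) 0
        simp only [List.length_cons, List.length_nil, Nat.zero_add, List.singleton_append] at hoff
        rw [hoff]
        rw [ih (some 'L') _]
        have hSH : PySem.Dict.getD SHIFT 'L' "" = PySem.Dict.getD SIGNS "LS" "" := by decide
        by_cases hmL : m = some 'L'
        · subst hmL
          rw [if_neg (show ¬ b0 = true by rw [hb0]; decide)]
          have hs : stepB (out, some 'L') c = (out ++ [v], some 'L') := by
            simp [stepB, hc, hL]
          rw [hs]
        · rw [if_pos (show b0 = true by rw [hb0]; simp; exact fun h => hmL h.symm)]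
          have hs : stepB (out, m) c
              = (out ++ [PySem.Dict.getD SIGNS "LS" "", v], some 'L') := by
            simp [stepB, hc, hL, hmL]
          rw [hs, hSH]
          simp
      | none =>
        cases hF : PySem.Dict.get? FIGURES c with
        | some v =>
          have hcl : classifyB c = some ('F', PySem.Dict.getD FIGURES c "") := by
            simp [classifyB, hc, hL, hF]
          have hgd : PySem.Dict.getD FIGURES c "" = v := by
            simp [PySem.Dict.getD, hF]
          have hk : kindNS c = some 'F' := by simp [kindNS, hc, hL, hF]
          simp only [List.filterMap_cons, hcl, hk, List.foldl_cons]
          have hneed : needFrom m ('F' :: cs.filterMap kindNS)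
              = (some 'F' != m) :: needFrom (some 'F') (cs.filterMap kindNS) := by
            simp [needFrom, List.zip]
          rw [hneed]
          set b0 : Bool := (some 'F' != m) with hb0
          set tail := needFrom (some 'F') (cs.filterMap kindNS) with htail
          have hm : mergeStepB (b0 :: tail) (out, 0) ('F', PySem.Dict.getD FIGURES c "")
              = ((if b0 then out ++ [PySem.Dict.getD SHIFT 'F' ""] else out)
                  ++ [v], 1) := by
            simp [mergeStepB, hgd]
          rw [hm]
          have hoff := merge_offset (cs.filterMap classifyB) [b0] tail
            ((if b0 then out ++ [PySem.Dict.getD SHIFT 'F' ""] else out) ++ [v]) 0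
          simp only [List.length_cons, List.length_nil, Nat.zero_add, List.singleton_append] at hoff
          rw [hoff]
          rw [ih (some 'F') _]
          have hSH : PySem.Dict.getD SHIFT 'F' "" = PySem.Dict.getD SIGNS "FS" "" := by decide
          by_cases hmF : m = some 'F'
          · subst hmF
            rw [if_neg (show ¬ b0 = true by rw [hb0]; decide)]
            have hs : stepB (out, some 'F') c = (out ++ [v], some 'F') := by
              simp [stepB, hc, hL, hF]
            rw [hs]
          · rw [if_pos (show b0 = true by rw [hb0]; simp; exact fun h => hmF h.symm)]
            have hs : stepB (out, m) c
                = (out ++ [PySem.Dict.getD SIGNS "FS" "", v], some 'F') := by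
              simp [stepB, hc, hL, hF, hmF]
            rw [hs, hSH]
            simp
        | none =>
          have hcl : classifyB c = none := by simp [classifyB, hc, hL, hF]
          have hk : kindNS c = none := by simp [kindNS, hc, hL, hF]
          simp only [List.filterMap_cons, hcl, hk]
          have hs : stepB (out, m) c = (out, m) := by simp [stepB, hc, hL, hF]
          rw [List.foldl_cons, hs]
          exact ih m out

lemma staged_eq_fold (cs : List Char) :
    ((cs.filterMap classifyB).foldl
        (mergeStepB
          (((((cs.filterMap classifyB).filterMap
                (fun t => if t.1 ≠ ' ' then some t.1 else none)).zip
              ((none : Option Char) ::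
                ((cs.filterMap classifyB).filterMap
                  (fun t => if t.1 ≠ ' ' then some t.1 else none)).map some))).map
            (fun p => some p.1 != p.2))) ([], 0)).1
      = (cs.foldl stepB ([], none)).1 := by
  rw [kinds_eq]
  exact merge_eq_fold cs none []

lemma B_eq_fold (info : String) :
    encodeBaudot_alt info
      = ((PySem.Str.join " " (PySem.Str.split₀ (PySem.Str.upper info))).toList.foldl
          stepB ([], none)).1 :=
  staged_eq_fold _

-- ===== VERDICT (by name: the statement is the Claim_ definition above) =====
theorem encodeBaudot_spec : Claim_equal_encodeBaudot := by
  intro info _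
  unfold Spec_encodeBaudot
  rw [A_eq_fold, B_eq_fold]
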